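-- pv_equiv track=rewrite | github.com/NitinSingh8/Dynaimc-Programming-Python | Unbounded Knapsack/variation of unbouned knapsack/rope_cutting_problem.py | rope_cutting
-- ===== SOURCE A (Python) =====
-- def rope_cutting(length, price, N):
--     n = len(length)
--     m = [[0] * (N + 1) for _ in range(n + 1)]
--     for i in range(1, n + 1):
--         for j in range(1, N + 1):
--             if length[i - 1] <= j:
--                 m[i][j] = max(price[i - 1] + m[i][j - length[i - 1]], m[i - 1][j])
--             else:
--                 m[i][j] = m[i - 1][j]
--     return m[n][N]
-- ===== SOURCE B (Python) =====
-- def rope_cutting(length, price, N):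
--     # 1D bottom-up over capacities: dp[j] = best price for a rope of length j
--     # using any multiset of pieces; scans all pieces per capacity.
--     dp = [0]
--     for j in range(1, N + 1):
--         best = 0
--         for l, p in zip(length, price):
--             if l <= j:
--                 best = max(best, p + dp[j - l])
--         dp.append(best)
--     return dp[N]
-- ===== Notes on version B (the rewrite author's own statement) =====
-- stated objective: faster
-- what changed: Replaces the (n+1)x(N+1) item-row table (item-major fill) with a single capacity-major pass: one 1D dp list grown from capacity 0 to N, scanning all pieces per capacity, so the 2D table and the row-copy branch disappear.
-- outside the precondition, e.g. on rope_cutting([0, 0], [5, 7], 1): A returns 7, B raises IndexError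
import Mathlib
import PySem

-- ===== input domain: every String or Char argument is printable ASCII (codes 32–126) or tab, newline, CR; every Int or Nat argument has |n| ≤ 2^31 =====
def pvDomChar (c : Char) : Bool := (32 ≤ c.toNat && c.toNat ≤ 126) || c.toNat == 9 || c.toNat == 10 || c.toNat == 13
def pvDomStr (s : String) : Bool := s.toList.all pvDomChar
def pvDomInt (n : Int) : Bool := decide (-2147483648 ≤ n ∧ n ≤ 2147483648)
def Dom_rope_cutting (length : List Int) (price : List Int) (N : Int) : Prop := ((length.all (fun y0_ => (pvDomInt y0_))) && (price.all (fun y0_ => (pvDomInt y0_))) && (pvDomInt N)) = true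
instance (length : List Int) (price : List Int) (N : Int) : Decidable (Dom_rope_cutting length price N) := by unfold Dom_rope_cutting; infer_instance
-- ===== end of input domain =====

-- B replaces A's (n+1)x(N+1) item-major table with one capacity-major 1D dp pass (faster by a
-- constant factor, O(N) instead of O(n*N) space); equivalence is about the return value only.

-- ===== PORT A =====
-- Literal transliteration of A: full 2D table, outer loop over items i, inner over capacities j.
-- pyGetD/pySetD indexing is exact on Pre_ (all indices are in range and nonnegative there).
def rope_cutting (length : List Int) (price : List Int) (N : Int) : Int :=
  let n : Int := length.length
  let m0 : List (List Int) :=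
    (PySem.List.pyRange 0 (n + 1) 1).map (fun _ => List.replicate (N + 1).toNat 0)
  let m :=
    (PySem.List.pyRange 1 (n + 1) 1).foldl (fun m i =>
      (PySem.List.pyRange 1 (N + 1) 1).foldl (fun m j =>
        let l := PySem.List.pyGetD length (i - 1) 0
        let v := if l ≤ j then
            max (PySem.List.pyGetD price (i - 1) 0 +
                   PySem.List.pyGetD (PySem.List.pyGetD m i []) (j - l) 0)
                (PySem.List.pyGetD (PySem.List.pyGetD m (i - 1) []) j 0)
          else PySem.List.pyGetD (PySem.List.pyGetD m (i - 1) []) j 0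
        PySem.List.pySetD m i (PySem.List.pySetD (PySem.List.pyGetD m i []) j v)) m) m0
  PySem.List.pyGetD (PySem.List.pyGetD m n []) N 0

-- ===== PORT B =====
-- Literal transliteration of B (Source B): dp grows by one entry per capacity j = 1..N,
-- each entry a scan over zip(length, price).
def rope_cutting_alt (length : List Int) (price : List Int) (N : Int) : Int :=
  let items := length.zip price
  let dp :=
    (PySem.List.pyRange 1 (N + 1) 1).foldl (fun dp j =>
      let best := items.foldl (fun b lp =>
        if lp.1 ≤ j then max b (lp.2 + PySem.List.pyGetD dp (j - lp.1) 0) else b) 0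
      dp ++ [best]) [0]
  PySem.List.pyGetD dp N 0

-- ===== PRECONDITION & SPEC =====
-- Pre_ excludes exactly: N < 0, a negative piece length with N ≥ 1, and a price list missing an
-- entry for a piece whose length fits (on all of which A raises IndexError); and zero-length
-- pieces with N ≥ 1, where A returns a finite value that is an artefact of its table-fill order
-- (a free piece of positive price makes the unbounded optimum infinite) and B itself raises.
def Pre_rope_cutting (length : List Int) (price : List Int) (N : Int) : Prop :=
  0 ≤ N ∧ (1 ≤ N →
    (∀ l ∈ length, 1 ≤ l) ∧
    (∀ i : Nat, i < length.length → length.getD i 0 ≤ N → i < price.length))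
instance (length : List Int) (price : List Int) (N : Int) : Decidable (Pre_rope_cutting length price N) := by unfold Pre_rope_cutting; infer_instance
def pvWitness_rope_cutting : List Int × List Int × Int := ([1, 2], [1, 3], 4)

def Spec_rope_cutting (length : List Int) (price : List Int) (N : Int) (out : Int) : Prop := out = rope_cutting_alt length price N
instance (length : List Int) (price : List Int) (N : Int) (out : Int) : Decidable (Spec_rope_cutting length price N out) := by unfold Spec_rope_cutting; infer_instance

-- ===== CLAIM (what is proved, stated in full; the proofs are below) =====
def Claim_equal_rope_cutting : Prop := ∀ (length : List Int) (price : List Int) (N : Int), Dom_rope_cutting length price N → Pre_rope_cutting length price N → Spec_rope_cutting length price N (rope_cutting length price N)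

-- ===== LEMMAS AND PROOFS =====

-- A cell of A's table.
def cellOf (m : List (List Int)) (r c : Nat) : Int := (m.getD r []).getD c 0

-- A's row recurrence, written as a recursive function: frec L P i j = m[i][j].
def frec (L P : List Int) : Nat → Nat → Int
  | 0, _ => 0
  | (i+1), j =>
    let l := L.getD i 0
    if h : 1 ≤ l ∧ l ≤ (j : Int) then
      max (P.getD i 0 + frec L P (i+1) (j - l.toNat)) (frec L P i j)
    else frec L P i j
termination_by i j => (i, j)
decreasing_by
  all_goals first
    | (apply Prod.Lex.right; omega)
    | (apply Prod.Lex.left; omega)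

theorem frec_succ (L P : List Int) (i j : Nat) :
    frec L P (i+1) j =
      (if 1 ≤ L.getD i 0 ∧ L.getD i 0 ≤ (j : Int) then
        max (P.getD i 0 + frec L P (i+1) (j - (L.getD i 0).toNat)) (frec L P i j)
      else frec L P i j) := by
  rw [frec]; split <;> simp_all

theorem frec_zero_cap (L P : List Int) (i : Nat) : frec L P i 0 = 0 := by
  induction i with
  | zero => rw [frec]
  | succ i ih =>
    rw [frec_succ]
    split
    · omega
    · exact ih

theorem frec_nonneg (L P : List Int) (i j : Nat) : 0 ≤ frec L P i j := by
  induction i generalizing j with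
  | zero => rw [frec]
  | succ i ih =>
    rw [frec_succ]
    split
    · exact le_trans (ih j) (le_max_right _ _)
    · exact ih j

theorem frec_mono (L P : List Int) (i j : Nat) : frec L P i j ≤ frec L P (i+1) j := by
  rw [frec_succ]; split
  · exact le_max_right _ _
  · exact le_refl _

theorem frec_mono_le (L P : List Int) {i i' : Nat} (h : i ≤ i') (j : Nat) :
    frec L P i j ≤ frec L P i' j := by
  induction i' with
  | zero => simp_all
  | succ k ih =>
    rcases Nat.lt_or_ge i (k+1) with hlt | hge
    · exact le_trans (ih (by omega)) (frec_mono L P k j)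
    · have : i = k+1 := by omega
      simp [this]

-- ---- generic fold-max lemmas for B's inner scan ----
theorem le_foldl_step (j : Int) (G : Int × Int → Int) (xs : List (Int × Int)) (b : Int) :
    b ≤ xs.foldl (fun b lp => if lp.1 ≤ j then max b (lp.2 + G lp) else b) b := by
  induction xs generalizing b with
  | nil => simp
  | cons x xs ih =>
    simp only [List.foldl_cons]
    refine le_trans ?_ (ih _)
    split
    · exact le_max_left _ _
    · exact le_refl _

theorem foldl_step_le (j : Int) (G : Int × Int → Int) (xs : List (Int × Int)) (b c : Int)
    (hb : b ≤ c) (h : ∀ lp ∈ xs, lp.1 ≤ j → lp.2 + G lp ≤ c) :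
    xs.foldl (fun b lp => if lp.1 ≤ j then max b (lp.2 + G lp) else b) b ≤ c := by
  induction xs generalizing b with
  | nil => simpa using hb
  | cons x xs ih =>
    simp only [List.foldl_cons]
    have h' : ∀ lp ∈ xs, lp.1 ≤ j → lp.2 + G lp ≤ c :=
      fun lp hm hc => h lp (List.mem_cons_of_mem _ hm) hc
    have hb' : (if x.1 ≤ j then max b (x.2 + G x) else b) ≤ c := by
      split
      · rename_i hx
        exact max_le hb (h x List.mem_cons_self hx)
      · exact hb
    exact ih _ hb' h'

theorem mem_le_foldl_step (j : Int) (G : Int × Int → Int) (xs : List (Int × Int)) (b : Int)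
    {lp : Int × Int} (hmem : lp ∈ xs) (hc : lp.1 ≤ j) :
    lp.2 + G lp ≤ xs.foldl (fun b lp => if lp.1 ≤ j then max b (lp.2 + G lp) else b) b := by
  induction xs generalizing b with
  | nil => cases hmem
  | cons x xs ih =>
    simp only [List.foldl_cons]
    rcases List.mem_cons.1 hmem with h | h
    · subst h
      refine le_trans ?_ (le_foldl_step j G xs _)
      rw [if_pos hc]
      exact le_max_right _ _
    · exact ih _ h

-- ---- B's table ----
def stepB (L P : List Int) (dp : List Int) (j : Int) : Int :=
  (L.zip P).foldl (fun b lp =>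
    if lp.1 ≤ j then max b (lp.2 + PySem.List.pyGetD dp (j - lp.1) 0) else b) 0

def tbl (L P : List Int) : Nat → List Int
  | 0 => [0]
  | (t+1) => tbl L P t ++ [stepB L P (tbl L P t) ((t : Int) + 1)]

def opt (L P : List Int) (j : Nat) : Int := (tbl L P j).getD j 0

theorem length_tbl (L P : List Int) (t : Nat) : (tbl L P t).length = t + 1 := by
  induction t with
  | zero => rfl
  | succ t ih => simp [tbl, ih]

theorem tbl_getD (L P : List Int) {k t : Nat} (h : k ≤ t) :
    (tbl L P t).getD k 0 = opt L P k := by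
  induction t with
  | zero => interval_cases k; rfl
  | succ t ih =>
    rcases Nat.lt_or_ge k (t+1) with hk | hk
    · rw [tbl]
      rw [List.getD, List.getElem?_append_left (by rw [length_tbl]; omega)]
      exact ih (by omega)
    · have hke : k = t + 1 := by omega
      subst hke; rfl

theorem opt_zero (L P : List Int) : opt L P 0 = 0 := rfl

theorem getD_concat_self (xs : List Int) (x : Int) : (xs ++ [x]).getD xs.length 0 = x := by
  simp [List.getD]

def cand (L P : List Int) (j : Nat) : Int :=
  (L.zip P).foldl (fun b lp =>
    if lp.1 ≤ ((j:Int)+1) then max b (lp.2 + opt L P (j + 1 - lp.1.toNat)) else b) 0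

theorem opt_succ (L P : List Int) (j : Nat) (hpos : ∀ lp ∈ L.zip P, (1:Int) ≤ lp.1) :
    opt L P (j+1) = cand L P j := by
  have h1 : opt L P (j+1) = stepB L P (tbl L P j) ((j:Int)+1) := by
    show (tbl L P (j+1)).getD (j+1) 0 = _
    rw [tbl]
    have h := getD_concat_self (tbl L P j) (stepB L P (tbl L P j) ((j:Int)+1))
    rw [length_tbl] at h
    exact h
  rw [h1, stepB, cand]
  refine List.foldl_ext _ _ _ ?_
  intro b lp hm
  by_cases hc : lp.1 ≤ ((j:Int)+1)
  · rw [if_pos hc, if_pos hc]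
    have hl := hpos lp hm
    have hcast : ((j:Int)+1) - lp.1 = ((j + 1 - lp.1.toNat : Nat) : Int) := by omega
    rw [hcast, PySem.List.pyGetD_natCast]
    rw [tbl_getD L P (by omega : j + 1 - lp.1.toNat ≤ j)]
  · rw [if_neg hc, if_neg hc]

-- The exchange lemma: using item k once more never beats m[i][j].
theorem frec_exchange (L P : List Int) :
    ∀ j i k : Nat, k < i → 1 ≤ L.getD k 0 → L.getD k 0 ≤ (j : Int) →
      P.getD k 0 + frec L P i (j - (L.getD k 0).toNat) ≤ frec L P i j := by
  intro j
  induction j using Nat.strong_induction_on with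
  | _ j SIH =>
  intro i
  induction i with
  | zero => intro k hk _ _; omega
  | succ i IH =>
    intro k hk h1 h2
    by_cases hg : 1 ≤ L.getD i 0 ∧ L.getD i 0 ≤ (j:Int)
    · rw [frec_succ L P i j, if_pos hg]
      rcases eq_or_ne k i with hk' | hk'
      · subst hk'
        exact le_max_left _ _
      · have hki : k < i := by omega
        rw [frec_succ]
        by_cases hg2 : 1 ≤ L.getD i 0 ∧ L.getD i 0 ≤ ((j - (L.getD k 0).toNat : Nat) : Int)
        · rw [if_pos hg2]
          rw [max_comm (P.getD i 0 + _), ← max_add_add_left]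
          refine max_le ?_ ?_
          · exact le_trans (IH k hki h1 h2) (le_max_right _ _)
          · have hjlt : j - (L.getD i 0).toNat < j := by omega
            have harith : j - (L.getD k 0).toNat - (L.getD i 0).toNat
                = (j - (L.getD i 0).toNat) - (L.getD k 0).toNat := by omega
            have hkle : L.getD k 0 ≤ ((j - (L.getD i 0).toNat : Nat) : Int) := by omega
            have hS := SIH (j - (L.getD i 0).toNat) hjlt (i+1) k (by omega) h1 hkle
            calc P.getD k 0 + (P.getD i 0 + frec L P (i+1) (j - (L.getD k 0).toNat - (L.getD i 0).toNat))
                = P.getD i 0 + (P.getD k 0 + frec L P (i+1) ((j - (L.getD i 0).toNat) - (L.getD k 0).toNat)) := by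
                  rw [harith]; ring
              _ ≤ P.getD i 0 + frec L P (i+1) (j - (L.getD i 0).toNat) := by omega
              _ ≤ max (P.getD i 0 + frec L P (i+1) (j - (L.getD i 0).toNat)) (frec L P i j) := le_max_left _ _
        · rw [if_neg hg2]
          exact le_trans (IH k hki h1 h2) (le_max_right _ _)
    · rw [frec_succ L P i j, if_neg hg]
      have hki : k < i := by
        rcases eq_or_ne k i with hke | hke
        · exfalso; apply hg; subst hke; exact ⟨h1, h2⟩
        · omega
      rw [frec_succ]
      have hg2 : ¬ (1 ≤ L.getD i 0 ∧ L.getD i 0 ≤ ((j - (L.getD k 0).toNat : Nat) : Int)) := by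
        intro hx
        exact hg ⟨hx.1, by omega⟩
      rw [if_neg hg2]
      exact IH k hki h1 h2

theorem getD_zip (L P : List Int) (k : Nat) (hk : k < (L.zip P).length) :
    (L.zip P).getD k (0,0) = (L.getD k 0, P.getD k 0) := by
  have h1 : k < L.length := by simp at hk; omega
  have h2 : k < P.length := by simp at hk; omega
  rw [List.getD_eq_getElem _ _ hk, List.getD_eq_getElem _ _ h1, List.getD_eq_getElem _ _ h2]
  simp

theorem mem_zip_of_lt (L P : List Int) (k : Nat) (hk : k < (L.zip P).length) :
    (L.getD k 0, P.getD k 0) ∈ L.zip P := by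
  rw [← getD_zip L P k hk, List.getD_eq_getElem _ _ hk]
  exact List.getElem_mem _

theorem frec_le_cand (L P : List Int) (j : Nat)
    (Hj : ∀ m, m ≤ j → frec L P (L.zip P).length m = opt L P m) :
    ∀ i, i ≤ (L.zip P).length → frec L P i (j+1) ≤ cand L P j := by
  intro i
  induction i with
  | zero => intro _; rw [frec]; exact le_foldl_step _ _ _ _
  | succ i ih =>
    intro hin
    rw [frec_succ]
    split
    · rename_i hg
      refine max_le ?_ (ih (by omega))
      have hkzip : i < (L.zip P).length := by omega
      have hmem := mem_zip_of_lt L P i hkzip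
      have hstep := mem_le_foldl_step ((j:Int)+1)
        (fun lp => opt L P (j + 1 - lp.1.toNat)) (L.zip P) 0 hmem
        (by show L.getD i 0 ≤ (j:Int)+1
            have := hg.2; push_cast at this; omega)
      refine le_trans ?_ hstep
      simp only
      have hmono := frec_mono_le L P (show i+1 ≤ (L.zip P).length by omega)
        (j+1 - (L.getD i 0).toNat)
      have hopt := Hj (j+1 - (L.getD i 0).toNat) (by omega)
      rw [← hopt]
      omega
    · rename_i hg
      exact ih (by omega)

theorem cand_le_frec (L P : List Int) (j : Nat)
    (hpos : ∀ lp ∈ L.zip P, (1:Int) ≤ lp.1)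
    (Hj : ∀ m, m ≤ j → frec L P (L.zip P).length m = opt L P m) :
    cand L P j ≤ frec L P (L.zip P).length (j+1) := by
  rw [cand]
  refine foldl_step_le _ _ _ _ _ (frec_nonneg _ _ _ _) ?_
  intro lp hm hc
  obtain ⟨k, hk, hke⟩ := List.getElem_of_mem hm
  have h1 : k < L.length := by simp at hk; omega
  have h2 : k < P.length := by simp at hk; omega
  have hlp1 : lp.1 = L.getD k 0 := by
    rw [← hke]; simp [List.getD, h1]
  have hlp2 : lp.2 = P.getD k 0 := by
    rw [← hke]; simp [List.getD, h2]
  have hl1 : (1:Int) ≤ L.getD k 0 := by rw [← hlp1]; exact hpos lp hm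
  have hopt := Hj (j + 1 - lp.1.toNat) (by rw [hlp1]; omega)
  rw [← hopt, hlp1, hlp2]
  have hle : L.getD k 0 ≤ ((j+1 : Nat) : Int) := by rw [← hlp1]; push_cast; omega
  exact frec_exchange L P (j+1) (L.zip P).length k hk hl1 hle

-- frec (over the zipped prefix) equals opt.
theorem frec_eq_opt (L P : List Int) (hpos : ∀ lp ∈ L.zip P, (1:Int) ≤ lp.1) :
    ∀ j : Nat, frec L P (L.zip P).length j = opt L P j := by
  intro j
  induction j using Nat.strong_induction_on with
  | _ j SIH =>
  match j with
  | 0 => rw [frec_zero_cap, opt_zero]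
  | (j+1) =>
    have Hj : ∀ m, m ≤ j → frec L P (L.zip P).length m = opt L P m :=
      fun m hm => SIH m (by omega)
    rw [opt_succ L P j hpos]
    exact le_antisymm (frec_le_cand L P j Hj _ (le_refl _)) (cand_le_frec L P j hpos Hj)

-- items beyond the zipped prefix are no-ops for frec below capacity N
theorem frec_drop (L P : List Int) (N : Int) (W : Nat)
    (hW : (W : Int) ≤ N)
    (hpre : ∀ i : Nat, i < L.length → L.getD i 0 ≤ N → i < P.length) :
    frec L P L.length W = frec L P (L.zip P).length W := by
  have hz : (L.zip P).length = min L.length P.length := by simp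
  rcases Nat.le_total L.length P.length with h | h
  · rw [hz, Nat.min_eq_left h]
  · have key : ∀ d : Nat, frec L P ((L.zip P).length + d) W = frec L P (L.zip P).length W := by
      intro d
      induction d with
      | zero => rfl
      | succ d ih =>
        rw [show (L.zip P).length + (d+1) = ((L.zip P).length + d) + 1 by omega]
        rw [frec_succ]
        rw [if_neg ?_]
        · exact ih
        · intro hx
          rcases Nat.lt_or_ge ((L.zip P).length + d) L.length with hlt | hge
          · have := hpre ((L.zip P).length + d) hlt (by omega)
            rw [hz] at this
            omega
          · rw [List.getD_eq_default _ _ hge] at hx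
            omega
    have hd : L.length = (L.zip P).length + (L.length - (L.zip P).length) := by
      rw [hz]; omega
    rw [hd, key]

-- ---- port B as the table ----
theorem fold_tbl (L P : List Int) : ∀ t : Nat,
    (PySem.List.pyRange 1 ((t:Int)+1) 1).foldl (fun dp j => dp ++ [stepB L P dp j]) [0]
      = tbl L P t := by
  intro t
  induction t with
  | zero => rw [PySem.List.pyRange_one_eq_nil (by omega)]; rfl
  | succ t ih =>
    rw [show (((t+1:Nat)):Int)+1 = ((t:Int)+1)+1 by push_cast; ring]
    rw [PySem.List.pyRange_one_succ_right (by omega), List.foldl_append]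
    simp only [List.foldl_cons, List.foldl_nil]
    rw [ih]
    rfl

theorem portB_eq_opt (L P : List Int) (N : Int) (h0 : 0 ≤ N) :
    rope_cutting_alt L P N = opt L P N.toNat := by
  have hN : ((N.toNat : Nat) : Int) = N := Int.toNat_of_nonneg h0
  show PySem.List.pyGetD
      ((PySem.List.pyRange 1 (N+1) 1).foldl (fun dp j => dp ++ [stepB L P dp j]) [0]) N 0
    = opt L P N.toNat
  rw [← hN, fold_tbl L P N.toNat, PySem.List.pyGetD_natCast]
  exact tbl_getD L P (le_refl _)

-- ---- the A-side invariant ----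
def stepA (L P : List Int) (i : Int) (m : List (List Int)) (j : Int) : List (List Int) :=
  let l := PySem.List.pyGetD L (i - 1) 0
  let v := if l ≤ j then
      max (PySem.List.pyGetD P (i - 1) 0 +
             PySem.List.pyGetD (PySem.List.pyGetD m i []) (j - l) 0)
          (PySem.List.pyGetD (PySem.List.pyGetD m (i - 1) []) j 0)
    else PySem.List.pyGetD (PySem.List.pyGetD m (i - 1) []) j 0
  PySem.List.pySetD m i (PySem.List.pySetD (PySem.List.pyGetD m i []) j v)

theorem getD_set_list (m : List (List Int)) (i : Nat) (row : List Int) (r : Nat)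
    (hi : i < m.length) :
    (m.set i row).getD r [] = if r = i then row else m.getD r [] := by
  rcases eq_or_ne r i with h | h
  · subst h; simp [List.getD, hi]
  · simp [List.getD, List.getElem?_set_ne (by omega : i ≠ r), h]

theorem getD_set_int (row : List Int) (j : Nat) (v : Int) (c : Nat) (hj : j < row.length) :
    (row.set j v).getD c 0 = if c = j then v else row.getD c 0 := by
  rcases eq_or_ne c j with h | h
  · subst h; simp [List.getD, hj]
  · simp [List.getD, List.getElem?_set_ne (by omega : j ≠ c), h]

-- after processing columns 1..t of row i (rows < i complete, rows > i untouched)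
def InvI (L P : List Int) (W : Nat) (i t : Nat) (m : List (List Int)) : Prop :=
  m.length = L.length + 1 ∧
  (∀ r : Nat, r ≤ L.length → (m.getD r []).length = W + 1) ∧
  (∀ r c : Nat, r ≤ L.length → c ≤ W →
    cellOf m r c = if r < i ∨ (r = i ∧ c ≤ t) then frec L P r c else 0)

theorem invI_step (L P : List Int) (W : Nat)
    (hpos : ∀ l ∈ L, (1:Int) ≤ l) (i t : Nat) (hi1 : 1 ≤ i) (hin : i ≤ L.length)
    (ht : t < W) (m : List (List Int)) (hm : InvI L P W i t m) :
    InvI L P W i (t+1) (stepA L P (i:Int) m ((t:Int)+1)) := by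
  obtain ⟨hlen, hrows, hcells⟩ := hm
  have hi1' : ((i:Int) - 1) = ((i-1 : Nat) : Int) := by omega
  have ht1 : ((t:Int) + 1) = ((t+1 : Nat) : Int) := by omega
  have hl1 : (1:Int) ≤ L.getD (i-1) 0 := by
    have hmem : L.getD (i-1) 0 ∈ L := by
      rw [List.getD_eq_getElem _ _ (by omega : i-1 < L.length)]
      exact List.getElem_mem _
    exact hpos _ hmem
  have hval : stepA L P (i:Int) m ((t:Int)+1)
      = m.set i ((m.getD i []).set (t+1) (frec L P i (t+1))) := by
    rw [stepA]
    simp only [hi1', ht1, PySem.List.pyGetD_natCast, PySem.List.pySetD_natCast]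
    congr 1
    congr 1
    rw [show i = (i-1)+1 by omega, frec_succ, show (i-1)+1 = i by omega]
    by_cases hc : L.getD (i-1) 0 ≤ ((t+1 : Nat) : Int)
    · rw [if_pos hc, if_pos ⟨hl1, hc⟩]
      have hix : ((t+1 : Nat) : Int) - L.getD (i-1) 0
          = ((t+1 - (L.getD (i-1) 0).toNat : Nat) : Int) := by omega
      rw [hix, PySem.List.pyGetD_natCast]
      have hc1 : cellOf m i (t+1 - (L.getD (i-1) 0).toNat)
          = frec L P i (t+1 - (L.getD (i-1) 0).toNat) := by
        rw [hcells i _ hin (by omega)]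
        rw [if_pos (Or.inr ⟨rfl, by omega⟩)]
      have hc2 : cellOf m (i-1) (t+1) = frec L P (i-1) (t+1) := by
        rw [hcells (i-1) _ (by omega) (by omega)]
        rw [if_pos (Or.inl (by omega))]
      rw [← hc1, ← hc2]
      rfl
    · rw [if_neg hc, if_neg (by intro hx; exact hc hx.2)]
      have hc2 : cellOf m (i-1) (t+1) = frec L P (i-1) (t+1) := by
        rw [hcells (i-1) _ (by omega) (by omega)]
        rw [if_pos (Or.inl (by omega))]
      rw [← hc2]
      rfl
  rw [hval]
  have hiltm : i < m.length := by omega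
  have hrowlen : (m.getD i []).length = W + 1 := hrows i hin
  refine ⟨by simp [hlen], ?_, ?_⟩
  · intro r hr
    rw [getD_set_list _ _ _ _ hiltm]
    split
    · rw [List.length_set]
      exact hrowlen
    · exact hrows r hr
  · intro r c hr hc
    rw [cellOf, getD_set_list _ _ _ _ hiltm]
    split
    · rename_i hre
      subst hre
      rw [getD_set_int _ _ _ _ (by omega)]
      split
      · rename_i hce
        subst hce
        rw [if_pos (Or.inr ⟨rfl, le_refl _⟩)]
      · rename_i hce
        have hold := hcells r c hr hc
        rw [cellOf] at hold
        rw [hold]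
        by_cases h1 : r < r ∨ (r = r ∧ c ≤ t)
        · rw [if_pos h1, if_pos (by omega : r < r ∨ (r = r ∧ c ≤ t+1))]
        · rw [if_neg h1, if_neg (by omega : ¬ (r < r ∨ (r = r ∧ c ≤ t+1)))]
    · rename_i hre
      have hold := hcells r c hr hc
      rw [cellOf] at hold
      rw [hold]
      by_cases h1 : r < i ∨ (r = i ∧ c ≤ t)
      · rw [if_pos h1, if_pos (by omega : r < i ∨ (r = i ∧ c ≤ t+1))]
      · rw [if_neg h1, if_neg (by omega : ¬ (r < i ∨ (r = i ∧ c ≤ t+1)))]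

theorem inner_fold_inv (L P : List Int) (W : Nat)
    (hpos : 1 ≤ W → ∀ l ∈ L, (1:Int) ≤ l) (i : Nat) (hi1 : 1 ≤ i) (hin : i ≤ L.length)
    (m : List (List Int)) (hm : InvI L P W i 0 m) :
    ∀ t : Nat, t ≤ W →
      InvI L P W i t ((PySem.List.pyRange 1 ((t:Int)+1) 1).foldl (stepA L P (i:Int)) m) := by
  intro t
  induction t with
  | zero =>
    intro _
    rw [PySem.List.pyRange_one_eq_nil (by omega)]
    exact hm
  | succ t ih =>
    intro htW
    rw [show (((t+1:Nat)):Int)+1 = ((t:Int)+1)+1 by push_cast; ring]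
    rw [PySem.List.pyRange_one_succ_right (by omega), List.foldl_append]
    simp only [List.foldl_cons, List.foldl_nil]
    exact invI_step L P W (hpos (by omega)) i t hi1 hin (by omega) _ (ih (by omega))

theorem inv_shift (L P : List Int) (W : Nat) (i : Nat) (m : List (List Int))
    (hm : InvI L P W i W m) : InvI L P W (i+1) 0 m := by
  obtain ⟨hlen, hrows, hcells⟩ := hm
  refine ⟨hlen, hrows, ?_⟩
  intro r c hr hc
  rw [hcells r c hr hc]
  split_ifs with h1 h2 h2
  · rfl
  · omega
  · have hr1 : r = i + 1 := by omega
    have hc0 : c = 0 := by omega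
    subst hr1; subst hc0
    rw [frec_zero_cap]
  · rfl

theorem inv_base (L P : List Int) (N : Int) (W : Nat) (hNW : N = (W:Int)) :
    InvI L P W 0 W
      ((PySem.List.pyRange 0 ((L.length:Int)+1) 1).map
        (fun _ => List.replicate (N+1).toNat 0)) := by
  have hlen : ((PySem.List.pyRange 0 ((L.length:Int)+1) 1).map
      (fun _ => List.replicate (N+1).toNat (0:Int))).length = L.length + 1 := by
    simp [PySem.List.length_pyRange_one]
  have hrow : ∀ r : Nat, r ≤ L.length →
      ((PySem.List.pyRange 0 ((L.length:Int)+1) 1).map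
        (fun _ => List.replicate (N+1).toNat (0:Int))).getD r []
        = List.replicate (N+1).toNat (0:Int) := by
    intro r hr
    rw [List.getD_eq_getElem _ _ (by rw [hlen]; omega)]
    simp
  refine ⟨hlen, ?_, ?_⟩
  · intro r hr
    rw [hrow r hr]
    simp
    omega
  · intro r c hr hc
    rw [cellOf, hrow r hr]
    have hz : (List.replicate (N+1).toNat (0:Int)).getD c 0 = 0 := by simp [List.getD]
    rw [hz]
    split_ifs with h1
    · rcases h1 with h | h
      · omega
      · rw [h.1, frec]
    · rfl

theorem portA_eq_frec (L P : List Int) (N : Int) (h0 : 0 ≤ N)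
    (hpos : 1 ≤ N → ∀ l ∈ L, (1:Int) ≤ l) :
    rope_cutting L P N = frec L P L.length N.toNat := by
  obtain ⟨W, hNW⟩ : ∃ W : Nat, N = (W:Int) := ⟨N.toNat, by omega⟩
  subst hNW
  have hpos' : 1 ≤ W → ∀ l ∈ L, (1:Int) ≤ l := fun h => hpos (by exact_mod_cast h)
  rw [Int.toNat_natCast]
  show PySem.List.pyGetD
      (PySem.List.pyGetD
        ((PySem.List.pyRange 1 ((L.length:Int)+1) 1).foldl
          (fun m i => (PySem.List.pyRange 1 ((W:Int)+1) 1).foldl (stepA L P i) m)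
          ((PySem.List.pyRange 0 ((L.length:Int)+1) 1).map
            (fun _ => List.replicate ((W:Int)+1).toNat 0)))
        (L.length:Int) []) (W:Int) 0
    = frec L P L.length W
  have houter : ∀ i : Nat, i ≤ L.length →
      InvI L P W i W
        ((PySem.List.pyRange 1 ((i:Int)+1) 1).foldl
          (fun m i => (PySem.List.pyRange 1 ((W:Int)+1) 1).foldl (stepA L P i) m)
          ((PySem.List.pyRange 0 ((L.length:Int)+1) 1).map
            (fun _ => List.replicate ((W:Int)+1).toNat 0))) := by
    intro i
    induction i with
    | zero =>
      intro _
      have h0r : PySem.List.pyRange 1 (((0:Nat):Int)+1) 1 = [] :=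
        PySem.List.pyRange_one_eq_nil (by omega)
      rw [h0r]
      simp only [List.foldl_nil]
      exact inv_base L P ((W:Int)) W rfl
    | succ i ih =>
      intro hin
      have hsplit : PySem.List.pyRange 1 ((((i+1:Nat)):Int)+1) 1
          = PySem.List.pyRange 1 ((i:Int)+1) 1 ++ [((i:Int)+1)] := by
        rw [show ((((i+1:Nat)):Int)+1) = ((i:Int)+1)+1 by push_cast; ring]
        exact PySem.List.pyRange_one_succ_right (by omega)
      rw [hsplit, List.foldl_append]
      simp only [List.foldl_cons, List.foldl_nil]
      have hshift := inv_shift L P W i _ (ih (by omega))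
      have hres := inner_fold_inv L P W hpos' (i+1) (by omega) (by omega) _ hshift W (le_refl _)
      rw [show ((i:Int)+1) = (((i+1:Nat)):Int) by push_cast; ring]
      exact hres
  have hfin := houter L.length (le_refl _)
  obtain ⟨hlen, hrows, hcells⟩ := hfin
  rw [PySem.List.pyGetD_natCast, PySem.List.pyGetD_natCast]
  have hcell := hcells L.length W (le_refl _) (le_refl _)
  rw [cellOf] at hcell
  rw [hcell, if_pos (Or.inr ⟨rfl, le_refl _⟩)]

-- ===== VERDICT (by name: the statement is the Claim_ definition above) =====
theorem rope_cutting_spec : Claim_equal_rope_cutting := by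
  intro L P N _ hpre
  obtain ⟨h0, hrest⟩ := hpre
  show rope_cutting L P N = rope_cutting_alt L P N
  rw [portA_eq_frec L P N h0 (fun h1 => (hrest h1).1),
      portB_eq_opt L P N h0]
  rcases lt_or_ge N 1 with h1 | h1
  · have hN0 : N.toNat = 0 := by omega
    rw [hN0, frec_zero_cap, opt_zero]
  · obtain ⟨hpos, hpre2⟩ := hrest h1
    have hposzip : ∀ lp ∈ L.zip P, (1:Int) ≤ lp.1 :=
      fun lp hm => hpos lp.1 (List.of_mem_zip hm).1
    rw [frec_drop L P N N.toNat (by omega) hpre2]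
    exact frec_eq_opt L P hposzip N.toNat
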